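-- pv_equiv track=rewrite | github.com/scissorstail/study | programmers/code_test_practice/heap/42626.py | solution
-- ===== SOURCE A (Python) =====
-- import heapq
--
-- def solution(scoville, K):
--     h = scoville
--     heapq.heapify(h)
--
--     count = 0
--     answer = 0
--     first = heapq.heappop(h)
--     while(True):
--         if(first >= K):
--             answer = count
--             break
--
--         if not h:
--             answer = -1
--             break
--
--         second = heapq.heappop(h)
--
--         first = heapq.heappushpop(h, first + (second * 2)) # 값을 힙에 추가하면서 가장 작은 값도 반환
--
--         count += 1
--
--     return answer
-- ===== SOURCE B (Python) =====
-- # Two-queue merge instead of a heap: sort once, then keep the combined values in a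
-- # FIFO queue (they are consumed in the order produced); the minimum is always one of
-- # the two front elements.  Return-value equivalent to A; unlike A it does not mutate
-- # the argument (A heapifies/pops `scoville` in place).
-- def solution(scoville, K):
--     s = sorted(scoville)
--     q = []
--     i = j = 0
--
--     def nxt():
--         nonlocal i, j
--         if i < len(s) and (j >= len(q) or s[i] <= q[j]):
--             v = s[i]
--             i += 1
--         else:
--             v = q[j]
--             j += 1
--         return v
--
--     count = 0
--     first = nxt()
--     while first < K:
--         if i >= len(s) and j >= len(q):
--             return -1
--         second = nxt()
--         q.append(first + second * 2)
--         first = nxt()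
--         count += 1
--     return count
-- ===== Notes on version B (the rewrite author's own statement) =====
-- stated objective: alternative
-- what changed: Replaces the binary heap with sort-once plus a two-queue merge: combined values go into a FIFO queue and the running minimum is always one of the two front elements, so no heap structure is maintained (a loop invariant shows the queue stays sorted).
import Mathlib
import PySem

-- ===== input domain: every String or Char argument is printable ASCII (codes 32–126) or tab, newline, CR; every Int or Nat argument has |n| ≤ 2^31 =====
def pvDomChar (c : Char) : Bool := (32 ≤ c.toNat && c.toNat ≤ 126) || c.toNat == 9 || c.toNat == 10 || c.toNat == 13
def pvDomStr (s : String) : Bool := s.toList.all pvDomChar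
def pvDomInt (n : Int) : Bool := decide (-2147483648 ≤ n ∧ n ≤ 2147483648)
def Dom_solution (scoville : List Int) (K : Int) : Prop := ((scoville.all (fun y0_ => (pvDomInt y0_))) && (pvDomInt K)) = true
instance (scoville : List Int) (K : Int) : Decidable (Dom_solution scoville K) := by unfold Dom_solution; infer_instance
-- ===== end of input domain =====

-- B replaces A's binary heap by sort-once + a two-queue merge; return-value
-- equivalence only: Python A mutates `scoville` in place (heapify/pops), B does not.

-- ===== PORT A =====
-- heapq is ported at its documented min-priority-queue semantics: heappop returns the
-- minimum and removes one occurrence, heappushpop h v returns min(h-min, v) and leaves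
-- the multiset h + {v} - {returned value}.  This is exact for the return value: the
-- heap's internal layout is only ever observed through these minima (all elements are
-- plain ints, so equal values are indistinguishable).
def loopA (h : List Int) (first K count : Int) : Int :=
  if first ≥ K then count
  else
    match hs : PySem.List.min? h (fun x => x) with
    | none => -1                                   -- `if not h: answer = -1`
    | some second =>
      -- second = heapq.heappop(h); then first = heapq.heappushpop(h, first + (second * 2))
      match hm : PySem.List.min? (h.erase second) (fun x => x) with
      | none => loopA (h.erase second) (first + second * 2) K (count + 1)
      | some m =>
        if m < first + second * 2 then
          loopA ((h.erase second).erase m ++ [first + second * 2]) m K (count + 1)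
        else
          loopA (h.erase second) (first + second * 2) K (count + 1)
termination_by h.length
decreasing_by
  all_goals
    first
    | (have hmem2 : second ∈ h := PySem.List.min?_mem hs
       have h2l := List.length_erase_of_mem hmem2
       have hmemm : m ∈ h.erase second := PySem.List.min?_mem hm
       have hml := List.length_erase_of_mem hmemm
       have hne : h ≠ [] := List.ne_nil_of_mem hmem2
       have hp := List.length_pos_of_ne_nil hne
       have hne2 : (h.erase second) ≠ [] := List.ne_nil_of_mem hmemm
       have hp2 := List.length_pos_of_ne_nil hne2
       simp only [List.length_append, List.length_cons, List.length_nil]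
       omega)
    | (have hmem2 : second ∈ h := PySem.List.min?_mem hs
       have h2l := List.length_erase_of_mem hmem2
       have hne : h ≠ [] := List.ne_nil_of_mem hmem2
       have hp := List.length_pos_of_ne_nil hne
       omega)

def solution (scoville : List Int) (K : Int) : Int :=
  match PySem.List.min? scoville (fun x => x) with
  | none => 0                                      -- heappop of an empty heap raises IndexError: outside Pre_
  | some first => loopA (scoville.erase first) first K 0

-- ===== PORT B =====
-- Source B's nxt(): pop the smaller of the two front elements (sorted array suffix S,
-- queue suffix Q); ties are taken from S, exactly as `s[i] <= q[j]` does.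
def nxtB : List Int → List Int → Option (Int × List Int × List Int)
  | [], [] => none
  | a :: S, [] => some (a, S, [])
  | [], b :: Q => some (b, [], Q)
  | a :: S, b :: Q => if a ≤ b then some (a, S, b :: Q) else some (b, a :: S, Q)

-- length bookkeeping used by loopB's termination proof
theorem nxtB_length {S Q : List Int} {x : Int} {S' Q' : List Int}
    (h : nxtB S Q = some (x, S', Q')) : S'.length + Q'.length + 1 = S.length + Q.length := by
  cases S <;> cases Q <;> simp only [nxtB] at h
  · exact absurd h (by simp)
  · simp only [Option.some.injEq, Prod.mk.injEq] at h
    obtain ⟨h1, h2, h3⟩ := h; subst h2; subst h3; simp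
  · simp only [Option.some.injEq, Prod.mk.injEq] at h
    obtain ⟨h1, h2, h3⟩ := h; subst h2; subst h3; simp
  · split at h <;> simp only [Option.some.injEq, Prod.mk.injEq] at h <;>
      obtain ⟨h1, h2, h3⟩ := h <;> subst h2 <;> subst h3 <;> simp <;> omega

def loopB (S Q : List Int) (first K count : Int) : Int :=
  if first ≥ K then count
  else
    match h1 : nxtB S Q with
    | none => -1                                   -- `if i >= len(s) and j >= len(q): return -1`
    | some (second, S1, Q1) =>
      match h2 : nxtB S1 (Q1 ++ [first + second * 2]) with
      | none => 0                                  -- unreachable: the queue handed to nxt() is nonempty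
      | some (f2, S2, Q3) => loopB S2 Q3 f2 K (count + 1)
termination_by S.length + Q.length
decreasing_by
  have e1 := nxtB_length h1
  have e2 := nxtB_length h2
  simp at e2; omega

def solution_alt (scoville : List Int) (K : Int) : Int :=
  match nxtB (PySem.List.sorted scoville (fun x => x) false) [] with
  | none => 0                                      -- Source B's first nxt() raises IndexError on empty input: outside Pre_
  | some (first, S1, Q1) => loopB S1 Q1 first K 0

-- ===== PRECONDITION & SPEC =====
-- Pre_ excludes only the empty list, on which both A and B raise IndexError.
def Pre_solution (scoville : List Int) (K : Int) : Prop := scoville ≠ []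
instance (scoville : List Int) (K : Int) : Decidable (Pre_solution scoville K) := by unfold Pre_solution; infer_instance
def pvWitness_solution : List Int × Int := ([1, 2, 3, 9, 10, 12], 7)

def Spec_solution (scoville : List Int) (K : Int) (out : Int) : Prop := out = solution_alt scoville K
instance (scoville : List Int) (K : Int) (out : Int) : Decidable (Spec_solution scoville K out) := by unfold Spec_solution; infer_instance

-- ===== CLAIM (what is proved, stated in full; the proofs are below) =====
def Claim_equal_solution : Prop := ∀ (scoville : List Int) (K : Int), Dom_solution scoville K → Pre_solution scoville K → Spec_solution scoville K (solution scoville K)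

-- ===== LEMMAS AND PROOFS =====

theorem nxtB_none_iff (S Q : List Int) : nxtB S Q = none ↔ S = [] ∧ Q = [] := by
  cases S <;> cases Q <;> simp [nxtB]
  split <;> simp

-- nxtB pops the minimum of S ++ Q (S, Q sorted), leaving a permutation of the rest;
-- the queue part only shrinks.
theorem nxtB_spec {S Q : List Int} {x : Int} {S' Q' : List Int}
    (h : nxtB S Q = some (x, S', Q'))
    (hS : S.Pairwise (· ≤ ·)) (hQ : Q.Pairwise (· ≤ ·)) :
    (S ++ Q).Perm (x :: (S' ++ Q')) ∧
    S'.Pairwise (· ≤ ·) ∧ Q'.Pairwise (· ≤ ·) ∧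
    (∀ y ∈ S' ++ Q', x ≤ y) ∧ (∀ p ∈ Q', p ∈ Q) := by
  cases S with
  | nil =>
    cases Q with
    | nil => exact absurd h (by simp [nxtB])
    | cons b Q =>
      simp only [nxtB, Option.some.injEq, Prod.mk.injEq] at h
      obtain ⟨rfl, rfl, rfl⟩ := h
      simp only [List.pairwise_cons] at hQ
      refine ⟨by simp, by simp, hQ.2, ?_, fun p hp => List.mem_cons_of_mem _ hp⟩
      simpa using hQ.1
  | cons a S =>
    cases Q with
    | nil =>
      simp only [nxtB, Option.some.injEq, Prod.mk.injEq] at h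
      obtain ⟨rfl, rfl, rfl⟩ := h
      simp only [List.pairwise_cons] at hS
      refine ⟨by simp, hS.2, by simp, ?_, by simp⟩
      simpa using hS.1
    | cons b Q =>
      simp only [nxtB] at h
      simp only [List.pairwise_cons] at hS hQ
      split at h <;> simp only [Option.some.injEq, Prod.mk.injEq] at h <;>
        obtain ⟨rfl, rfl, rfl⟩ := h
      · rename_i hab
        refine ⟨by simp, hS.2, List.pairwise_cons.mpr hQ, ?_, fun p hp => hp⟩
        intro y hy
        rcases List.mem_append.mp hy with hy | hy
        · exact hS.1 y hy
        · rcases List.mem_cons.mp hy with rfl | hy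
          · exact hab
          · exact le_trans hab (hQ.1 y hy)
      · rename_i hab
        rw [not_le] at hab
        refine ⟨?_, List.pairwise_cons.mpr hS, hQ.2, ?_, fun p hp => List.mem_cons_of_mem _ hp⟩
        · simpa using (List.perm_middle (a := b) (l₁ := a :: S) (l₂ := Q)).symm.symm
        · intro y hy
          rcases List.mem_append.mp hy with hy | hy
          · rcases List.mem_cons.mp hy with rfl | hy
            · exact le_of_lt hab
            · exact le_trans (le_of_lt hab) (hS.1 y hy)
          · exact hQ.1 y hy

theorem min_value_unique {l l' : List Int} {a b : Int} (hperm : l.Perm l')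
    (ha : a ∈ l) (hamin : ∀ y ∈ l, a ≤ y) (hb : b ∈ l') (hbmin : ∀ y ∈ l', b ≤ y) : a = b :=
  le_antisymm (hamin b (hperm.mem_iff.mpr hb)) (hbmin a (hperm.mem_iff.mp ha))

-- Main bisimulation: A's heap loop equals B's two-queue loop under the invariant
-- (multiset equality; S, Q sorted; first ≤ everything; and when the queue is
-- nonempty: everything is ≥ 0 and every queue element p satisfies p ≤ first + 2x
-- for every remaining x — in particular for the minimum).
theorem loopA_step_stop {h : List Int} {f K count : Int} (hK : f ≥ K) :
    loopA h f K count = count := by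
  rw [loopA, if_pos hK]

theorem loopA_step_none {h : List Int} {f K count : Int} (hK : ¬ f ≥ K)
    (hm : PySem.List.min? h (fun x => x) = none) : loopA h f K count = -1 := by
  rw [loopA, if_neg hK]
  split
  · rfl
  · rename_i sec heq; rw [hm] at heq; simp at heq

theorem loopA_step1 {h : List Int} {f K count sec : Int} (hK : ¬ f ≥ K)
    (hs : PySem.List.min? h (fun x => x) = some sec)
    (hm : PySem.List.min? (h.erase sec) (fun x => x) = none) :
    loopA h f K count = loopA (h.erase sec) (f + sec * 2) K (count + 1) := by
  rw [loopA, if_neg hK]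
  split
  · rename_i heq; rw [hs] at heq; simp at heq
  · rename_i sec' heq
    rw [hs] at heq
    simp only [Option.some.injEq] at heq; subst heq
    split
    · rfl
    · rename_i m heq2; rw [hm] at heq2; simp at heq2

theorem loopA_step2 {h : List Int} {f K count sec m : Int} (hK : ¬ f ≥ K)
    (hs : PySem.List.min? h (fun x => x) = some sec)
    (hm : PySem.List.min? (h.erase sec) (fun x => x) = some m)
    (hlt : m < f + sec * 2) :
    loopA h f K count = loopA ((h.erase sec).erase m ++ [f + sec * 2]) m K (count + 1) := by
  rw [loopA, if_neg hK]
  split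
  · rename_i heq; rw [hs] at heq; simp at heq
  · rename_i sec' heq
    rw [hs] at heq
    simp only [Option.some.injEq] at heq; subst heq
    split
    · rename_i heq2; exact absurd (hm.symm.trans heq2) (by simp)
    · rename_i m' heq2
      rw [hm] at heq2
      simp only [Option.some.injEq] at heq2; subst heq2
      rw [if_pos hlt]

theorem loopA_step3 {h : List Int} {f K count sec m : Int} (hK : ¬ f ≥ K)
    (hs : PySem.List.min? h (fun x => x) = some sec)
    (hm : PySem.List.min? (h.erase sec) (fun x => x) = some m)
    (hlt : ¬ m < f + sec * 2) :
    loopA h f K count = loopA (h.erase sec) (f + sec * 2) K (count + 1) := by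
  rw [loopA, if_neg hK]
  split
  · rename_i heq; rw [hs] at heq; simp at heq
  · rename_i sec' heq
    rw [hs] at heq
    simp only [Option.some.injEq] at heq; subst heq
    split
    · rename_i heq2; exact absurd (hm.symm.trans heq2) (by simp)
    · rename_i m' heq2
      rw [hm] at heq2
      simp only [Option.some.injEq] at heq2; subst heq2
      rw [if_neg hlt]

theorem loopB_step_stop {S Q : List Int} {f K count : Int} (hK : f ≥ K) :
    loopB S Q f K count = count := by
  rw [loopB, if_pos hK]

theorem loopB_step_none {S Q : List Int} {f K count : Int} (hK : ¬ f ≥ K)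
    (h1 : nxtB S Q = none) : loopB S Q f K count = -1 := by
  rw [loopB, if_neg hK]
  split
  · rfl
  · rename_i sec S1 Q1 heq; rw [h1] at heq; simp at heq

theorem loopB_step {S Q S1 Q1 S2 Q3 : List Int} {f sec f2 K count : Int} (hK : ¬ f ≥ K)
    (h1 : nxtB S Q = some (sec, S1, Q1))
    (h2 : nxtB S1 (Q1 ++ [f + sec * 2]) = some (f2, S2, Q3)) :
    loopB S Q f K count = loopB S2 Q3 f2 K (count + 1) := by
  rw [loopB, if_neg hK]
  split
  · rename_i heq; rw [h1] at heq; simp at heq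
  · rename_i sec' S1' Q1' heq
    rw [h1] at heq
    simp only [Option.some.injEq, Prod.mk.injEq] at heq
    obtain ⟨rfl, rfl, rfl⟩ := heq
    split
    · rename_i heq2; rw [h2] at heq2; simp at heq2
    · rename_i f2' S2' Q3' heq2
      rw [h2] at heq2
      simp only [Option.some.injEq, Prod.mk.injEq] at heq2
      obtain ⟨rfl, rfl, rfl⟩ := heq2
      rfl

theorem loopA_eq_loopB (n : Nat) : ∀ (h S Q : List Int) (f K count : Int),
    h.length = n → h.Perm (S ++ Q) →
    S.Pairwise (· ≤ ·) → Q.Pairwise (· ≤ ·) →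
    (∀ x ∈ S ++ Q, f ≤ x) →
    (Q ≠ [] → 0 ≤ f ∧ (∀ x ∈ S ++ Q, 0 ≤ x) ∧ (∀ p ∈ Q, ∀ x ∈ S ++ Q, p ≤ f + 2 * x)) →
    loopA h f K count = loopB S Q f K count := by
  induction n using Nat.strong_induction_on with
  | _ n IH =>
  intro h S Q f K count hlen hperm hS hQ hfmin hinv
  by_cases hK : f ≥ K
  · rw [loopA_step_stop hK, loopB_step_stop hK]
  rcases hminh : PySem.List.min? h (fun x => x) with _ | secA
  · -- empty heap: both return -1
    have hnil : h = [] := (PySem.List.min?_eq_none_iff _ _).mp hminh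
    subst hnil
    obtain ⟨hS0, hQ0⟩ := List.append_eq_nil_iff.mp hperm.symm.eq_nil
    subst hS0; subst hQ0
    rw [loopA_step_none hK hminh, loopB_step_none hK rfl]
  -- A pops secA = min h; B pops the same value x off the two fronts
  have hsecmem : secA ∈ h := PySem.List.min?_mem hminh
  have hsecmin : ∀ y ∈ h, secA ≤ y := PySem.List.min?_isMin hminh
  rcases hx : nxtB S Q with _ | ⟨x, S1, Q1⟩
  · exfalso
    obtain ⟨hS0, hQ0⟩ := (nxtB_none_iff _ _).mp hx
    subst hS0; subst hQ0
    have hh : h = [] := hperm.eq_nil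
    rw [hh] at hsecmem; exact absurd hsecmem (by simp)
  obtain ⟨hperm1, hS1, hQ1, hxmin, hQsub⟩ := nxtB_spec hx hS hQ
  have hxmem : x ∈ S ++ Q := hperm1.symm.subset List.mem_cons_self
  have hxall : ∀ y ∈ S ++ Q, x ≤ y := by
    intro y hy
    rcases List.mem_cons.mp (hperm1.subset hy) with rfl | hy'
    · exact le_refl _
    · exact hxmin y hy'
  have hxsec : secA = x := min_value_unique hperm hsecmem hsecmin hxmem hxall
  subst hxsec
  have hpermh1 : (h.erase secA).Perm (S1 ++ Q1) :=
    List.Perm.cons_inv (((List.perm_cons_erase hsecmem).symm.trans hperm).trans hperm1)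
  have hfsec : f ≤ secA := hfmin _ hxmem
  have heraseGe : ∀ y ∈ h.erase secA, secA ≤ y := fun y hy => hsecmin y (List.mem_of_mem_erase hy)
  -- the queue with the combined value appended stays sorted
  have hQ2p : (Q1 ++ [f + secA * 2]).Pairwise (· ≤ ·) := by
    refine List.pairwise_append.mpr ⟨hQ1, by simp, ?_⟩
    intro p hp y hy
    rcases List.mem_singleton.mp hy with rfl
    have hpQ : p ∈ Q := hQsub p hp
    obtain ⟨hf0, hall0, hbound⟩ := hinv (List.ne_nil_of_mem hpQ)
    have := hbound p hpQ secA hxmem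
    omega
  -- B's second pop (of the state h.erase secA + the combined value) always succeeds
  rcases hx2 : nxtB S1 (Q1 ++ [f + secA * 2]) with _ | ⟨f2, S2, Q3⟩
  · exfalso
    obtain ⟨-, habs⟩ := (nxtB_none_iff _ _).mp hx2
    simp at habs
  obtain ⟨hperm2, hS2, hQ3, hf2min, hQ3sub⟩ := nxtB_spec hx2 hS1 hQ2p
  have hpermM2 : (h.erase secA ++ [f + secA * 2]).Perm (f2 :: (S2 ++ Q3)) := by
    have e := hpermh1.append_right [f + secA * 2]
    rw [List.append_assoc] at e
    exact e.trans hperm2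
  have hf2mem : f2 ∈ h.erase secA ++ [f + secA * 2] := hpermM2.symm.subset List.mem_cons_self
  have hf2all : ∀ y ∈ h.erase secA ++ [f + secA * 2], f2 ≤ y := by
    intro y hy
    rcases List.mem_cons.mp (hpermM2.subset hy) with rfl | hy'
    · exact le_refl _
    · exact hf2min y hy'
  have hmemdec : ∀ y ∈ S2 ++ Q3, y ∈ h.erase secA ∨ y = f + secA * 2 := by
    intro y hy
    have : y ∈ h.erase secA ++ [f + secA * 2] :=
      hpermM2.symm.subset (List.mem_cons_of_mem _ hy)
    simpa using List.mem_append.mp this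
  have hlerase := List.length_erase_of_mem hsecmem
  have hpos := List.length_pos_of_ne_nil (List.ne_nil_of_mem hsecmem)
  rcases hm : PySem.List.min? (h.erase secA) (fun x => x) with _ | m
  · -- heap exhausted after popping secA: the combined value is popped right back
    have he : h.erase secA = [] := (PySem.List.min?_eq_none_iff _ _).mp hm
    rw [he] at hpermh1
    obtain ⟨hS10, hQ10⟩ := List.append_eq_nil_iff.mp hpermh1.symm.eq_nil
    subst hS10; subst hQ10
    have hx2' : nxtB ([] : List Int) ([] ++ [f + secA * 2]) =
        some (f + secA * 2, ([] : List Int), ([] : List Int)) := rfl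
    rw [hx2'] at hx2
    simp only [Option.some.injEq, Prod.mk.injEq] at hx2
    obtain ⟨hf2e, hS2e, hQ3e⟩ := hx2
    subst hf2e; subst hS2e; subst hQ3e
    rw [loopA_step1 hK hminh hm, loopB_step hK hx hx2']
    refine IH 0 (by omega) _ _ _ _ _ _ (by simp [he]) (by simp [he]) (by simp) (by simp)
      (by simp) (fun hne => absurd rfl hne)
  have hmmem : m ∈ h.erase secA := PySem.List.min?_mem hm
  have hmmin : ∀ y ∈ h.erase secA, m ≤ y := PySem.List.min?_isMin hm
  have hsm : secA ≤ m := heraseGe m hmmem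
  have hfm : f ≤ m := hfmin m (hperm.subset (List.mem_of_mem_erase hmmem))
  have hlerase2 := List.length_erase_of_mem hmmem
  have hpos2 := List.length_pos_of_ne_nil (List.ne_nil_of_mem hmmem)
  by_cases hlt : m < f + secA * 2
  · -- heappushpop swaps: the old min m comes out, the combined value stays in
    have hf2m : m = f2 := by
      refine min_value_unique (List.Perm.refl _) (List.mem_append_left _ hmmem) ?_ hf2mem hf2all
      intro y hy
      rcases List.mem_append.mp hy with hy' | hy'
      · exact hmmin y hy'
      · rcases List.mem_singleton.mp hy' with rfl; exact le_of_lt hlt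
    subst hf2m
    have hpermA : ((h.erase secA).erase m ++ [f + secA * 2]).Perm (S2 ++ Q3) := by
      have e1 : (h.erase secA ++ [f + secA * 2]).Perm
          (m :: ((h.erase secA).erase m ++ [f + secA * 2])) :=
        (List.perm_cons_erase hmmem).append_right _
      exact (e1.symm.trans hpermM2).cons_inv
    rw [loopA_step2 hK hminh hm hlt, loopB_step hK hx hx2]
    refine IH (((h.erase secA).erase m ++ [f + secA * 2]).length) ?_ _ _ _ _ _ _ rfl
      hpermA hS2 hQ3 hf2min ?_
    · simp only [List.length_append, List.length_cons, List.length_nil]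
      omega
    · -- re-establish the queue invariant after the swap
      intro hQ3ne
      have hsecpos : 0 < secA := by omega
      have hge_secA : ∀ y ∈ S2 ++ Q3, secA ≤ y := by
        intro y hy
        rcases hmemdec y hy with hy' | rfl
        · exact heraseGe y hy'
        · omega
      refine ⟨by omega, ?_, ?_⟩
      · intro y hy; have := hge_secA y hy; omega
      · intro p hp y hy
        have hyge := hge_secA y hy
        have hpbound : p ≤ f + 2 * secA := by
          rcases List.mem_append.mp (hQ3sub p hp) with hpQ1 | hpv
          · have hpQ : p ∈ Q := hQsub p hpQ1
            obtain ⟨-, -, hbound⟩ := hinv (List.ne_nil_of_mem hpQ)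
            exact hbound p hpQ secA hxmem
          · rcases List.mem_singleton.mp hpv with rfl; omega
        omega
  · -- heappushpop returns the combined value itself; the heap is unchanged
    have hf2v : f + secA * 2 = f2 := by
      refine min_value_unique (List.Perm.refl _)
        (List.mem_append_right _ (List.mem_singleton.mpr rfl)) ?_ hf2mem hf2all
      intro y hy
      rcases List.mem_append.mp hy with hy' | hy'
      · exact le_trans (not_lt.mp hlt) (hmmin y hy')
      · rcases List.mem_singleton.mp hy' with rfl; exact le_refl _
    subst hf2v
    have hpermA : (h.erase secA).Perm (S2 ++ Q3) :=
      ((List.perm_append_singleton _ _).symm.trans hpermM2).cons_inv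
    rw [loopA_step3 hK hminh hm hlt, loopB_step hK hx hx2]
    refine IH ((h.erase secA).length) (by omega) _ _ _ _ _ _ rfl hpermA hS2 hQ3 hf2min ?_
    intro hQ3ne
    by_cases hQ1e : Q1 = []
    · -- the surviving queue entry is a duplicate of the combined value, present in the heap
      subst hQ1e
      obtain ⟨p0, hp0⟩ := List.exists_mem_of_ne_nil _ hQ3ne
      have hp0v : p0 = f + secA * 2 := by simpa using hQ3sub p0 hp0
      subst hp0v
      have hvQ3 : 0 < List.count (f + secA * 2) (S2 ++ Q3) :=
        List.count_pos_iff.mpr (List.mem_append_right _ hp0)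
      have hcount := hperm2.count_eq (f + secA * 2)
      have h1c : List.count (f + secA * 2) (S1 ++ ([] ++ [f + secA * 2]))
          = List.count (f + secA * 2) S1 + 1 := by simp
      have h2c : List.count (f + secA * 2) ((f + secA * 2) :: (S2 ++ Q3))
          = List.count (f + secA * 2) (S2 ++ Q3) + 1 := by
        simp [List.count_cons]
      have hvS1 : f + secA * 2 ∈ S1 := List.count_pos_iff.mp (by omega)
      have hvErase : f + secA * 2 ∈ h.erase secA := by
        refine hpermh1.symm.subset ?_
        simpa using hvS1
      have hvge : secA ≤ f + secA * 2 := heraseGe _ hvErase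
      have hy0 : ∀ y ∈ S2 ++ Q3, 0 ≤ y := by
        intro y hy
        rcases hmemdec y hy with hy' | rfl
        · have := heraseGe y hy'; omega
        · omega
      refine ⟨by omega, hy0, ?_⟩
      intro p hp y hy
      have hpv : p = f + secA * 2 := by simpa using hQ3sub p hp
      have := hy0 y hy
      omega
    · -- an older queue entry survives: the old invariant already makes everything ≥ 0
      obtain ⟨p1, hp1⟩ := List.exists_mem_of_ne_nil _ hQ1e
      obtain ⟨hf0, hall0, hbound⟩ := hinv (List.ne_nil_of_mem (hQsub p1 hp1))
      have hsec0 : 0 ≤ secA := hall0 secA hxmem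
      have hy0 : ∀ y ∈ S2 ++ Q3, 0 ≤ y := by
        intro y hy
        rcases hmemdec y hy with hy' | rfl
        · exact hall0 y (hperm.subset (List.mem_of_mem_erase hy'))
        · omega
      refine ⟨by omega, hy0, ?_⟩
      intro p hp y hy
      have hyge := hy0 y hy
      rcases List.mem_append.mp (hQ3sub p hp) with hpQ1 | hpv
      · have := hbound p (hQsub p hpQ1) secA hxmem; omega
      · rcases List.mem_singleton.mp hpv with rfl; omega

-- ===== VERDICT (by name: the statement is the Claim_ definition above) =====
theorem solution_spec : Claim_equal_solution := by
  intro scoville K hdom hpre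
  unfold Spec_solution solution solution_alt
  rcases hmin : PySem.List.min? scoville (fun x => x) with _ | f
  · exact absurd ((PySem.List.min?_eq_none_iff _ _).mp hmin) hpre
  have hfmem : f ∈ scoville := PySem.List.min?_mem hmin
  have hfmin : ∀ y ∈ scoville, f ≤ y := PySem.List.min?_isMin hmin
  rcases hsrt : PySem.List.sorted scoville (fun x => x) false with _ | ⟨a, t⟩
  · exact absurd ((PySem.List.sorted_eq_nil_iff _ _ _).mp hsrt) hpre
  have hsp : (a :: t).Perm scoville := hsrt ▸ PySem.List.sorted_perm scoville (fun x => x) false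
  have hamem : a ∈ scoville := hsp.subset List.mem_cons_self
  have haall : ∀ y ∈ scoville, a ≤ y := PySem.List.key_head_sorted_le scoville (fun x => x) hsrt
  have haf : f = a := min_value_unique (List.Perm.refl scoville) hfmem hfmin hamem haall
  subst haf
  have hpw : (f :: t).Pairwise (· ≤ ·) := by
    have := PySem.List.sorted_pairwise scoville (fun x => x)
    rw [hsrt] at this
    exact this
  split
  · rename_i heq
    exact absurd heq (by simp)
  · rename_i first heq
    simp only [Option.some.injEq] at heq
    subst heq
    split
    · rename_i heq2
      exact absurd heq2 (by simp [nxtB])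
    · rename_i first' S1 Q1 heq2
      have hred : nxtB (f :: t) [] = some (f, t, []) := rfl
      rw [hred] at heq2
      simp only [Option.some.injEq, Prod.mk.injEq] at heq2
      obtain ⟨rfl, rfl, rfl⟩ := heq2
      refine loopA_eq_loopB ((scoville.erase f).length) _ _ _ _ _ _ rfl ?_ ?_ (by simp) ?_
        (fun hne => absurd rfl hne)
      · have h1 : scoville.Perm (f :: scoville.erase f) := List.perm_cons_erase hamem
        have h2 : (f :: t).Perm (f :: scoville.erase f) := hsp.trans h1
        simpa using h2.cons_inv.symm
      · exact hpw.of_cons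
      · intro x hx
        rw [List.append_nil] at hx
        exact (List.pairwise_cons.mp hpw).1 x hx
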